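-- pv_equiv track=rewrite | github.com/antjemeiresonne/advent_of_code_2025 | three.py | calculate_joltage
-- ===== SOURCE A (Python) =====
-- def calculate_joltage(bank):
--     bank_list = [int(x) for x in str(bank)]
--     first_battery_position = str(bank).find(str(max(bank_list)))
--     if first_battery_position == len(str(bank)) - 1:
--         second_battery_position = str(bank).find(str(max(bank_list[:-1])))
--         return int(str(bank_list[second_battery_position]) + str( bank_list[first_battery_position]))
--     else:
--         second_battery_position = str(bank).find(str(max(bank_list[first_battery_position + 1:])))
--         return int(str(bank_list[first_battery_position]) + str( bank_list[second_battery_position]))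
-- ===== SOURCE B (Python) =====
-- def calculate_joltage(bank):
--     digits = [int(x) for x in str(bank)]
--     n = len(digits)
--     return max(10 * digits[i] + digits[j] for i in range(n) for j in range(i + 1, n))
-- ===== Notes on version B (the rewrite author's own statement) =====
-- stated objective: simpler
-- what changed: Replaces A's greedy positional selection (string .find of the max digit, slice-dependent branches, string concatenation of the chosen digits) with a direct brute-force maximum of 10*digits[i]+digits[j] over all index pairs i<j.
import Mathlib
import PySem

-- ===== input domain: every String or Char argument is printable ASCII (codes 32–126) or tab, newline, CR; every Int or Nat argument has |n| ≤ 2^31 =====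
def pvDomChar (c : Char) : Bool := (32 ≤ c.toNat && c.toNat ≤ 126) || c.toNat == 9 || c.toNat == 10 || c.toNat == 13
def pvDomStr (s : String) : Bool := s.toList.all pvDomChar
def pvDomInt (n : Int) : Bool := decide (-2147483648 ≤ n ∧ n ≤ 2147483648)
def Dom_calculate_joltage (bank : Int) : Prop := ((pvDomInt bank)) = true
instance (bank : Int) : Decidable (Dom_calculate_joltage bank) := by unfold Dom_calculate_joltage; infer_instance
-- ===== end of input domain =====

-- B replaces A's greedy positional selection (.find of max digits, slice branches, digit-string
-- concatenation) by the plain maximum of 10*digits[i]+digits[j] over all index pairs i<j: simpler.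

-- ===== PORT A =====
def calculate_joltage (bank : Int) : Int :=
  let s := PySem.Int.toChars bank
  let bank_list := s.map (fun x => (PySem.Int.ofChars? [x]).getD 0)
  let first_battery_position :=
    PySem.Chars.find s (PySem.Int.toChars ((PySem.List.max? bank_list (fun v => v)).getD 0))
  if first_battery_position = PySem.List.len s - 1 then
    let second_battery_position :=
      PySem.Chars.find s (PySem.Int.toChars
        ((PySem.List.max? (PySem.List.slice bank_list none (some (-1))) (fun v => v)).getD 0))
    (PySem.Int.ofChars?
      (PySem.Int.toChars ((PySem.List.pyGet? bank_list second_battery_position).getD 0) ++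
       PySem.Int.toChars ((PySem.List.pyGet? bank_list first_battery_position).getD 0))).getD 0
  else
    let second_battery_position :=
      PySem.Chars.find s (PySem.Int.toChars
        ((PySem.List.max? (PySem.List.slice bank_list (some (first_battery_position + 1)) none) (fun v => v)).getD 0))
    (PySem.Int.ofChars?
      (PySem.Int.toChars ((PySem.List.pyGet? bank_list first_battery_position).getD 0) ++
       PySem.Int.toChars ((PySem.List.pyGet? bank_list second_battery_position).getD 0))).getD 0

-- ===== PORT B =====
def calculate_joltage_alt (bank : Int) : Int :=
  let digits := (PySem.Int.toChars bank).map (fun x => (PySem.Int.ofChars? [x]).getD 0)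
  let n := PySem.List.len digits
  (PySem.List.max?
    ((PySem.List.pyRange 0 n 1).flatMap (fun i =>
      (PySem.List.pyRange (i + 1) n 1).map (fun j =>
        10 * PySem.List.pyGetD digits i 0 + PySem.List.pyGetD digits j 0)))
    (fun v => v)).getD 0

-- ===== PRECONDITION & SPEC =====
-- Pre_: Python A raises on every negative bank (ValueError from int('-')) and on every
-- single-digit bank (max of an empty sequence); B raises on exactly the same inputs.
def Pre_calculate_joltage (bank : Int) : Prop := 10 ≤ bank
instance (bank : Int) : Decidable (Pre_calculate_joltage bank) := by
  unfold Pre_calculate_joltage; infer_instance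
def pvWitness_calculate_joltage : Int := 48

def Spec_calculate_joltage (bank : Int) (out : Int) : Prop := out = calculate_joltage_alt bank
instance (bank : Int) (out : Int) : Decidable (Spec_calculate_joltage bank out) := by unfold Spec_calculate_joltage; infer_instance

-- ===== CLAIM (what is proved, stated in full; the proofs are below) =====
def Claim_equal_calculate_joltage : Prop := ∀ (bank : Int), Dom_calculate_joltage bank → Pre_calculate_joltage bank → Spec_calculate_joltage bank (calculate_joltage bank)

-- ===== LEMMAS AND PROOFS =====

-- decimal digits of n, most significant first
def pvDigs (n : Nat) : List Nat :=
  if _ : n < 10 then [n] else pvDigs (n / 10) ++ [n % 10]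
decreasing_by exact Nat.div_lt_self (by omega) (by omega)

theorem pvDigs_lt (n : Nat) : ∀ x ∈ pvDigs n, x < 10 := by
  induction n using pvDigs.induct with
  | case1 n h => intro x hx; rw [pvDigs, dif_pos h] at hx; simp at hx; omega
  | case2 n h ih =>
    intro x hx; rw [pvDigs, dif_neg h] at hx
    rcases List.mem_append.mp hx with h' | h'
    · exact ih x h'
    · simp at h'; omega

theorem pvDigs_ne_nil (n : Nat) : pvDigs n ≠ [] := by
  rw [pvDigs]; split <;> simp

theorem pvDigs_len2 (n : Nat) (h : 10 ≤ n) : 2 ≤ (pvDigs n).length := by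
  rw [pvDigs, dif_neg (by omega)]
  have := pvDigs_ne_nil (n / 10)
  have : 1 ≤ (pvDigs (n / 10)).length := by
    cases h' : pvDigs (n / 10) <;> simp_all
  simp [List.length_append]; omega

theorem pvToDigitsCore_eq (f : Nat) : ∀ (n : Nat) (l : List Char), n < f →
    Nat.toDigitsCore 10 f n l = (pvDigs n).map Nat.digitChar ++ l := by
  induction f with
  | zero => intro n l h; omega
  | succ f ih =>
    intro n l h
    rw [Nat.toDigitsCore]
    by_cases h10 : n < 10
    · have : n / 10 = 0 := Nat.div_eq_of_lt h10
      simp [this, pvDigs, h10, Nat.mod_eq_of_lt h10]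
    · have hdiv : n / 10 ≠ 0 := by
        intro hc; exact h10 (by omega : n < 10)
      have hlt : n / 10 < f := by
        have := Nat.div_lt_self (by omega : 0 < n) (by omega : 1 < 10)
        omega
      simp only [hdiv, if_false]
      rw [ih (n / 10) _ hlt]
      conv_rhs => rw [pvDigs, dif_neg h10]
      simp

theorem pvToChars_nonneg (bank : Int) (h : 0 ≤ bank) :
    PySem.Int.toChars bank = (pvDigs bank.toNat).map Nat.digitChar := by
  rw [PySem.Int.toChars, if_neg (by omega), Nat.toDigits]
  rw [pvToDigitsCore_eq _ _ _ (Nat.lt_succ_self _)]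
  simp

theorem pvToChars_digit (k : Nat) (h : k < 10) :
    PySem.Int.toChars (k : Int) = [Nat.digitChar k] := by
  rw [pvToChars_nonneg _ (by omega)]
  simp only [Int.toNat_natCast]
  rw [pvDigs, dif_pos h]
  simp

theorem pvOfChars_digit : ∀ k < 10, PySem.Int.ofChars? [Nat.digitChar k] = some (k : Int) := by
  decide

theorem pvOfChars_two : ∀ a < 10, ∀ b < 10,
    PySem.Int.ofChars? [Nat.digitChar a, Nat.digitChar b] = some ((10 * a + b : Nat) : Int) := by
  decide

theorem pvDigitChar_inj : ∀ a < 10, ∀ b < 10, Nat.digitChar a = Nat.digitChar b → a = b := by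
  decide

theorem pvFind_go_single (c : Char) : ∀ (s : List Char) (k : Nat), c ∈ s →
    PySem.Chars.find.go [c] s k = ((k + s.findIdx (fun x => x == c) : Nat) : Int) := by
  intro s
  induction s with
  | nil => intro k h; simp at h
  | cons h t ih =>
    intro k hc
    rw [PySem.Chars.find.go]
    by_cases he : c = h
    · subst he
      simp [List.isPrefixOf, List.findIdx_cons]
    · have hph : ([c].isPrefixOf (h :: t)) = false := by
        simp [List.isPrefixOf]; intro hc'; exact he hc'
      have hmem : c ∈ t := by
        rcases List.mem_cons.mp hc with h' | h'
        · exact absurd h' he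
        · exact h'
      rw [hph]
      simp only [Bool.false_eq_true, if_false]
      rw [ih (k + 1) hmem]
      have : (h == c) = false := by simp; exact fun hc' => he hc'.symm
      rw [List.findIdx_cons, this]
      simp; omega

theorem pvFind_single (c : Char) (s : List Char) (h : c ∈ s) :
    PySem.Chars.find s [c] = (s.findIdx (fun x => x == c) : Int) := by
  rw [PySem.Chars.find, pvFind_go_single c s 0 h]
  norm_num

theorem pvFindIdx_congr {α : Type} (l : List α) (p q : α → Bool)
    (h : ∀ x ∈ l, p x = q x) : l.findIdx p = l.findIdx q := by
  induction l with
  | nil => rfl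
  | cons a t ih =>
    rw [List.findIdx_cons, List.findIdx_cons, h a (by simp)]
    by_cases hq : q a = true
    · simp [hq]
    · simp only [Bool.not_eq_true] at hq
      simp [hq, ih (fun x hx => h x (List.mem_cons_of_mem a hx))]

theorem pvCast_foldl_max : ∀ (t : List Nat) (a : Nat),
    (t.map (fun (k : Nat) => (k : Int))).foldl max (a : Int) = ((t.foldl max a : Nat) : Int) := by
  intro t
  induction t with
  | nil => simp
  | cons x s ih =>
    intro a
    simp only [List.map_cons, List.foldl_cons]
    rw [← Nat.cast_max, ih]

-- max of a nonempty Nat list, as the ports' running max computes it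
def pvNmax : List Nat → Nat
  | [] => 0
  | h :: t => t.foldl max h

theorem pvNmax_mem (l : List Nat) (h : l ≠ []) : pvNmax l ∈ l := by
  cases l with
  | nil => simp at h
  | cons a t =>
    rcases PySem.List.foldl_max_mem t a with h' | h'
    · rw [pvNmax, h']; simp
    · rw [pvNmax]; exact List.mem_cons_of_mem a h'

theorem pvNmax_isMax (l : List Nat) : ∀ x ∈ l, x ≤ pvNmax l := by
  cases l with
  | nil => simp
  | cons a t =>
    intro x hx
    rcases List.mem_cons.mp hx with h' | h'
    · rw [h', pvNmax]; exact (PySem.List.le_foldl_max t a).1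
    · rw [pvNmax]; exact (PySem.List.le_foldl_max t a).2 x h'

theorem pvMax?_map_cast (ds : List Nat) (h : ds ≠ []) :
    PySem.List.max? (ds.map (fun (k : Nat) => (k : Int))) (fun v => v) = some ((pvNmax ds : Nat) : Int) := by
  cases ds with
  | nil => simp at h
  | cons a t =>
    simp only [List.map_cons]
    rw [PySem.List.max?_id_cons, pvCast_foldl_max, pvNmax]

-- the pair list B builds, with its membership characterisation
theorem pvMem_pairs (d : List Int) (v : Int) :
    v ∈ ((PySem.List.pyRange 0 (PySem.List.len d) 1).flatMap (fun i =>
      (PySem.List.pyRange (i + 1) (PySem.List.len d) 1).map (fun j =>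
        10 * PySem.List.pyGetD d i 0 + PySem.List.pyGetD d j 0)))
    ↔ ∃ a b : Nat, a < b ∧ b < d.length ∧ v = 10 * d.getD a 0 + d.getD b 0 := by
  simp only [List.mem_flatMap, List.mem_map, PySem.List.mem_pyRange_one, PySem.List.len_eq]
  constructor
  · rintro ⟨i, ⟨hi0, hin⟩, j, ⟨hj1, hjn⟩, hv⟩
    refine ⟨i.toNat, j.toNat, by omega, by omega, ?_⟩
    rw [← hv,
      PySem.List.pyGetD_eq_getElem d 0 hi0 hin,
      PySem.List.pyGetD_eq_getElem d 0 (by omega) hjn]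
    rw [List.getD_eq_getElem d 0 (by omega), List.getD_eq_getElem d 0 (by omega)]
  · rintro ⟨a, b, hab, hbn, hv⟩
    refine ⟨(a : Int), ⟨by omega, by exact_mod_cast Nat.lt_of_lt_of_le hab (by omega)⟩,
      (b : Int), ⟨by omega, by exact_mod_cast hbn⟩, ?_⟩
    rw [PySem.List.pyGetD_eq_getElem d 0 (by omega) (by exact_mod_cast (by omega : a < d.length)),
      PySem.List.pyGetD_eq_getElem d 0 (by omega) (by exact_mod_cast hbn)]
    rw [hv, List.getD_eq_getElem d 0 (by omega), List.getD_eq_getElem d 0 hbn]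
    simp

theorem pvMax_pairs (ds : List Nat) (t : Nat)
    (hwit : ∃ a b : Nat, a < b ∧ b < ds.length ∧ 10 * ds.getD a 0 + ds.getD b 0 = t)
    (hub : ∀ a b : Nat, a < b → b < ds.length → 10 * ds.getD a 0 + ds.getD b 0 ≤ t) :
    (PySem.List.max?
      ((PySem.List.pyRange 0 ((ds.length : Nat) : Int) 1).flatMap (fun i =>
        (PySem.List.pyRange (i + 1) ((ds.length : Nat) : Int) 1).map (fun j =>
          10 * PySem.List.pyGetD (List.map (fun (k : Nat) => (k : Int)) ds) i 0 +
          PySem.List.pyGetD (List.map (fun (k : Nat) => (k : Int)) ds) j 0)))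
      (fun v => v)).getD 0 = (t : Int) := by
  rw [show ((ds.length : Nat) : Int) = PySem.List.len (List.map (fun (k : Nat) => (k : Int)) ds) by
    rw [PySem.List.len_eq, List.length_map]]
  have hg : ∀ a : Nat, (List.map (fun (k : Nat) => (k : Int)) ds).getD a 0 = (ds.getD a 0 : Int) := by
    intro a
    have : ((0 : Nat) : Int) = (0 : Int) := rfl
    rw [← this, List.getD_map]
  have hlen : (List.map (fun (k : Nat) => (k : Int)) ds).length = ds.length := List.length_map ..
  obtain ⟨a, b, hab, hbn, hv⟩ := hwit
  have htmem : (t : Int) ∈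
      ((PySem.List.pyRange 0 (PySem.List.len (List.map (fun (k : Nat) => (k : Int)) ds)) 1).flatMap (fun i =>
        (PySem.List.pyRange (i + 1) (PySem.List.len (List.map (fun (k : Nat) => (k : Int)) ds)) 1).map (fun j =>
          10 * PySem.List.pyGetD (List.map (fun (k : Nat) => (k : Int)) ds) i 0 +
          PySem.List.pyGetD (List.map (fun (k : Nat) => (k : Int)) ds) j 0))) := by
    rw [pvMem_pairs]
    refine ⟨a, b, hab, by omega, ?_⟩
    rw [hg, hg, ← hv]; push_cast; ring
  cases hmx : PySem.List.max?
      ((PySem.List.pyRange 0 (PySem.List.len (List.map (fun (k : Nat) => (k : Int)) ds)) 1).flatMap (fun i =>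
        (PySem.List.pyRange (i + 1) (PySem.List.len (List.map (fun (k : Nat) => (k : Int)) ds)) 1).map (fun j =>
          10 * PySem.List.pyGetD (List.map (fun (k : Nat) => (k : Int)) ds) i 0 +
          PySem.List.pyGetD (List.map (fun (k : Nat) => (k : Int)) ds) j 0)))
      (fun v => v) with
  | none =>
    rw [PySem.List.max?_eq_none_iff] at hmx
    rw [hmx] at htmem; simp at htmem
  | some v =>
    have hv1 := PySem.List.max?_mem hmx
    obtain ⟨a', b', hab', hbn', hv'⟩ := (pvMem_pairs _ v).mp hv1
    have h1 : v ≤ (t : Int) := by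
      have := hub a' b' hab' (by omega)
      rw [hv', hg, hg]
      omega
    have h2 : (t : Int) ≤ v := PySem.List.max?_isMax hmx _ htmem
    simp
    omega

theorem pv_main (bank : Int) (h10 : 10 ≤ bank) :
    calculate_joltage bank = calculate_joltage_alt bank := by
  have hN : 10 ≤ bank.toNat := by omega
  set ds := pvDigs bank.toNat with hds
  have hlt : ∀ x ∈ ds, x < 10 := pvDigs_lt _
  have hlen2 : 2 ≤ ds.length := pvDigs_len2 _ hN
  have hne : ds ≠ [] := by intro h; rw [h] at hlen2; simp at hlen2
  have hcs : PySem.Int.toChars bank = ds.map Nat.digitChar := pvToChars_nonneg bank (by omega)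
  have hbl : (ds.map Nat.digitChar).map (fun x => (PySem.Int.ofChars? [x]).getD 0)
      = List.map (fun (k : Nat) => (k : Int)) ds := by
    rw [List.map_map]
    apply List.map_congr_left
    intro k hk
    simp only [Function.comp]
    rw [pvOfChars_digit k (hlt k hk)]
    rfl
  have hfi : ∀ m : Nat, m < 10 →
      (ds.map Nat.digitChar).findIdx (fun x => x == Nat.digitChar m)
        = ds.findIdx (fun x => x == m) := by
    intro m hm
    rw [List.findIdx_map]
    apply pvFindIdx_congr
    intro x hx
    simp only [Function.comp]
    by_cases hxm : x = m
    · subst hxm; simp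
    · have h1 : (Nat.digitChar x == Nat.digitChar m) = false := by
        simp only [beq_eq_false_iff_ne, ne_eq]
        intro hc
        exact hxm (pvDigitChar_inj x (hlt x hx) m hm hc)
      have h2 : (x == m) = false := by simp [hxm]
      rw [h1, h2]
  have hfind : ∀ m : Nat, m < 10 → m ∈ ds →
      PySem.Chars.find (ds.map Nat.digitChar) (PySem.Int.toChars (m : Int))
        = ((ds.findIdx (fun x => x == m) : Nat) : Int) := by
    intro m hm hmem
    rw [pvToChars_digit m hm,
      pvFind_single _ _ (List.mem_map.mpr ⟨m, hmem, rfl⟩), hfi m hm]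
  have hval : ∀ m : Nat, (hm : m < 10) → (hmem : m ∈ ds) →
      (PySem.List.pyGet? (List.map (fun (k : Nat) => (k : Int)) ds)
        ((ds.findIdx (fun x => x == m) : Nat) : Int)).getD 0 = (m : Int) := by
    intro m hm hmem
    have hj : ds.findIdx (fun x => x == m) < ds.length :=
      List.findIdx_lt_length.mpr ⟨m, hmem, by simp⟩
    rw [PySem.List.pyGet?_natCast, List.getElem?_map,
      List.getElem?_eq_getElem hj]
    have hgd : ds[ds.findIdx (fun x => x == m)] = m := by
      have := @List.findIdx_getElem _ (fun x => x == m) ds hj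
      simpa using this
    simp [hgd]
  set M := pvNmax ds with hM
  have hMmem : M ∈ ds := pvNmax_mem ds hne
  have hMlt : M < 10 := hlt M hMmem
  have hMmax := pvNmax_isMax ds
  set i := ds.findIdx (fun x => x == M) with hi
  have hi_lt : i < ds.length := List.findIdx_lt_length.mpr ⟨M, hMmem, by simp⟩
  have hdi : ds[i] = M := by
    have := @List.findIdx_getElem _ (fun x => x == M) ds hi_lt
    simpa [← hi] using this
  have hfirst : ∀ k, (hk : k < ds.length) → k < i → ds[k] ≠ M := by
    intro k hk hki
    have := List.not_of_lt_findIdx (p := fun x => x == M) (xs := ds) (by omega)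
    simpa using this
  simp only [calculate_joltage, calculate_joltage_alt, hcs, hbl,
    pvMax?_map_cast ds hne, Option.getD_some, PySem.List.len_eq, List.length_map]
  rw [hfind M hMlt hMmem]
  by_cases hcase : i = ds.length - 1
  · rw [if_pos (by omega)]
    have hdne : ds.dropLast ≠ [] := by
      have : ds.dropLast.length = ds.length - 1 := List.length_dropLast
      intro h; rw [h] at this; simp at this; omega
    rw [PySem.List.slice_to_neg_one, ← List.map_dropLast,
      pvMax?_map_cast ds.dropLast hdne, Option.getD_some]
    set m2 := pvNmax ds.dropLast with hm2
    have hm2mem' : m2 ∈ ds.dropLast := pvNmax_mem _ hdne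
    have hm2mem : m2 ∈ ds := List.mem_of_mem_dropLast hm2mem'
    have hm2lt : m2 < 10 := hlt m2 hm2mem
    rw [hfind m2 hm2lt hm2mem, hval m2 hm2lt hm2mem, hval M hMlt hMmem,
      pvToChars_digit m2 hm2lt, pvToChars_digit M hMlt]
    rw [show [Nat.digitChar m2] ++ [Nat.digitChar M] = [Nat.digitChar m2, Nat.digitChar M] from rfl,
      pvOfChars_two m2 hm2lt M hMlt, Option.getD_some]
    symm
    apply pvMax_pairs
    · obtain ⟨a, ha, hda⟩ := List.mem_iff_getElem.mp hm2mem'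
      have han : a < ds.length - 1 := by
        have : ds.dropLast.length = ds.length - 1 := List.length_dropLast
        omega
      refine ⟨a, ds.length - 1, han, by omega, ?_⟩
      have h1 : ds.getD a 0 = m2 := by
        rw [← hda, List.getD_eq_getElem ds 0 (by omega)]
        exact (List.getElem_dropLast ha).symm
      have h2 : ds.getD (ds.length - 1) 0 = M := by
        rw [← hcase, List.getD_eq_getElem ds 0 (by omega)]
        exact hdi
      rw [h1, h2]
    · intro a b hab hbn
      rw [List.getD_eq_getElem ds 0 (by omega), List.getD_eq_getElem ds 0 (by omega)]
      have ha1 : ds[a] ≤ m2 := by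
        have hdl : a < ds.dropLast.length := by
          have : ds.dropLast.length = ds.length - 1 := List.length_dropLast
          omega
        have : ds.dropLast[a] = ds[a] := List.getElem_dropLast hdl
        rw [← this]
        exact pvNmax_isMax ds.dropLast _ (List.getElem_mem hdl)
      have hb1 : ds[b] ≤ M := hMmax _ (List.getElem_mem hbn)
      omega
  · rw [if_neg (by omega)]
    rw [show ((i : Int) + 1) = ((i + 1 : Nat) : Int) by push_cast; ring,
      PySem.List.slice_from_natCast, ← List.map_drop]
    have hdne : ds.drop (i + 1) ≠ [] := by
      have : (ds.drop (i + 1)).length = ds.length - (i + 1) := List.length_drop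
      intro h; rw [h] at this; simp at this; omega
    rw [pvMax?_map_cast _ hdne, Option.getD_some]
    set m2 := pvNmax (ds.drop (i + 1)) with hm2
    have hm2mem' : m2 ∈ ds.drop (i + 1) := pvNmax_mem _ hdne
    have hm2mem : m2 ∈ ds := List.mem_of_mem_drop hm2mem'
    have hm2lt : m2 < 10 := hlt m2 hm2mem
    rw [hfind m2 hm2lt hm2mem, hval m2 hm2lt hm2mem, hval M hMlt hMmem,
      pvToChars_digit m2 hm2lt, pvToChars_digit M hMlt]
    rw [show [Nat.digitChar M] ++ [Nat.digitChar m2] = [Nat.digitChar M, Nat.digitChar m2] from rfl,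
      pvOfChars_two M hMlt m2 hm2lt, Option.getD_some]
    symm
    apply pvMax_pairs
    · obtain ⟨b0, hb0, hdb0⟩ := List.mem_iff_getElem.mp hm2mem'
      have hb0n : (ds.drop (i + 1)).length = ds.length - (i + 1) := List.length_drop
      refine ⟨i, i + 1 + b0, by omega, by omega, ?_⟩
      rw [List.getD_eq_getElem ds 0 (by omega), List.getD_eq_getElem ds 0 (by omega)]
      have h1 : ds[i + 1 + b0]'(by omega) = m2 := by
        rw [← hdb0]
        exact List.getElem_drop.symm
      rw [show ds[i]'(by omega) = M from hdi, h1]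
    · intro a b hab hbn
      rw [List.getD_eq_getElem ds 0 (by omega), List.getD_eq_getElem ds 0 (by omega)]
      by_cases hdsa : ds[a] = M
      · have hai : i ≤ a := by
          by_contra hc
          exact hfirst a (by omega) (by omega) hdsa
        have hbm : ds[b] ≤ m2 := by
          have hbl' : b - (i + 1) < (ds.drop (i + 1)).length := by
            have : (ds.drop (i + 1)).length = ds.length - (i + 1) := List.length_drop
            omega
          have he : (ds.drop (i + 1))[b - (i + 1)] = ds[b] := by
            rw [List.getElem_drop]
            congr 1
            omega
          rw [← he]
          exact pvNmax_isMax _ _ (List.getElem_mem hbl')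
        rw [hdsa]
        omega
      · have ha1 : ds[a] ≤ M := hMmax _ (List.getElem_mem (by omega))
        have hb1 : ds[b] < 10 := hlt _ (List.getElem_mem hbn)
        have hm2nn : 0 ≤ m2 := Nat.zero_le _
        omega

-- ===== VERDICT (by name: the statement is the Claim_ definition above) =====
theorem calculate_joltage_spec : Claim_equal_calculate_joltage := by
  intro bank _ hpre
  unfold Spec_calculate_joltage
  exact pv_main bank hpre
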